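-- pv_equiv track=rewrite | github.com/elquedafe/rpiweb | webSensor.py | barraHum
-- ===== SOURCE A (Python) =====
-- def barraHum(h):
-- 	tableHum = '<table><tr>'
-- 	primero = True
-- 	contadorInterno = 0
-- 	count = 0
-- 	while count < 100:
-- 		if (count<(h)):
-- 			tableHum += '<td style="background-color:#2D3CAA">&nbsp;</td>'
-- 		else:
-- 			if (h<=90):
-- 				if(primero):
-- 					primero = False
-- 					tableHum += '<td id="tempNumBarra" style="font-size:14px"><i>'+str(h)+'%</i></td>'
-- 				else:
-- 					if (h >= 10):
-- 						if(contadorInterno > 5):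
-- 							tableHum += '<td>&nbsp;</td>'
-- 						else:
-- 							contadorInterno=contadorInterno+1
-- 					else:
-- 						if(contadorInterno > 4):
-- 							tableHum += '<td>&nbsp;</td>'
-- 						else:
-- 							contadorInterno=contadorInterno+1
-- 			else:
-- 				tableHum += '<td>&nbsp;</td>'
-- 		count = count+1
-- 	tableHum += '</tr></table>'
-- 	if (h>90):
-- 		tableHum += '<div style="font-size:14px; margin-left:'+str(h)+'%"><i>'+str(h)+'%</i></div>'
-- 	return tableHum
-- ===== SOURCE B (Python) =====
-- def barraHum(h):
--     BLUE = '<td style="background-color:#2D3CAA">&nbsp;</td>'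
--     PLAIN = '<td>&nbsp;</td>'
--     nb = max(0, min(100, h))
--     if h > 90:
--         cells = [BLUE] * nb + [PLAIN] * (100 - nb)
--         return ('<table><tr>' + ''.join(cells) + '</tr></table>'
--                 + '<div style="font-size:14px; margin-left:' + str(h) + '%"><i>' + str(h) + '%</i></div>')
--     k = 6 if h >= 10 else 5
--     cells = [BLUE] * nb
--     cells.append('<td id="tempNumBarra" style="font-size:14px"><i>' + str(h) + '%</i></td>')
--     cells += [PLAIN] * (100 - nb - 1 - k)
--     return '<table><tr>' + ''.join(cells) + '</tr></table>'
-- ===== Notes on version B (the rewrite author's own statement) =====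
-- stated objective: simpler
-- what changed: Replaces the hundred-iteration while loop with stateful flags (primero, contadorInterno) by a closed-form blue-cell count (h clamped to the bar width) and direct construction of the cell list via list replication and one join.
import Mathlib
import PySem

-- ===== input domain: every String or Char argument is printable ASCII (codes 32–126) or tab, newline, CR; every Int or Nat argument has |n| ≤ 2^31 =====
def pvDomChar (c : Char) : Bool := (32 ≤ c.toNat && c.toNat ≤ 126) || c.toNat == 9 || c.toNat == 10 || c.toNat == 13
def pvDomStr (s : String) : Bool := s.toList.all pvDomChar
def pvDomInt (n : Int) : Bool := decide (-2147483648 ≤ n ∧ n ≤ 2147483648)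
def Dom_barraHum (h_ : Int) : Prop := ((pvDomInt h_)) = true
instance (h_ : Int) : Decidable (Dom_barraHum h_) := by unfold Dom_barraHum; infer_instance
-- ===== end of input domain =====

-- B replaces A's 100-step stateful while loop by a closed-form cell count and list replication + join (simpler).

-- ===== PORT A =====
-- cell strings shared by the two ports (pure string literals)
def blueCell : String := "<td style=\"background-color:#2D3CAA\">&nbsp;</td>"
def plainCell : String := "<td>&nbsp;</td>"
def specialCell (h : Int) : String :=
  "<td id=\"tempNumBarra\" style=\"font-size:14px\"><i>" ++ PySem.Int.toStr h ++ "%</i></td>"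

-- the while loop of A: fuel = remaining iterations (count runs to 100), state (tableHum, primero, contadorInterno)
def loopA (h : Int) : Nat → Int → String → Bool → Int → String
  | 0, _, tableHum, _, _ => tableHum
  | Nat.succ n, count, tableHum, primero, ci =>
    if count < h then
      loopA h n (count + 1) (tableHum ++ blueCell) primero ci
    else if h ≤ 90 then
      if primero then
        loopA h n (count + 1) (tableHum ++ specialCell h) false ci
      else if h ≥ 10 then
        if ci > 5 then loopA h n (count + 1) (tableHum ++ plainCell) primero ci
        else loopA h n (count + 1) tableHum primero (ci + 1)
      else
        if ci > 4 then loopA h n (count + 1) (tableHum ++ plainCell) primero ci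
        else loopA h n (count + 1) tableHum primero (ci + 1)
    else
      loopA h n (count + 1) (tableHum ++ plainCell) primero ci

def barraHum (h_ : Int) : String :=
  let t := loopA h_ 100 0 "<table><tr>" true 0
  let t := t ++ "</tr></table>"
  if h_ > 90 then
    t ++ ("<div style=\"font-size:14px; margin-left:" ++ PySem.Int.toStr h_ ++ "%\"><i>"
          ++ PySem.Int.toStr h_ ++ "%</i></div>")
  else t

-- ===== PORT B =====
def barraHum_alt (h_ : Int) : String :=
  let nb : Nat := (max 0 (min 100 h_)).toNat
  if h_ > 90 then
    let cells := List.replicate nb blueCell ++ List.replicate (100 - nb) plainCell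
    "<table><tr>" ++ String.join cells ++ "</tr></table>"
      ++ "<div style=\"font-size:14px; margin-left:" ++ PySem.Int.toStr h_ ++ "%\"><i>"
      ++ PySem.Int.toStr h_ ++ "%</i></div>"
  else
    let k : Nat := if h_ ≥ 10 then 6 else 5
    let cells := List.replicate nb blueCell ++ [specialCell h_]
                   ++ List.replicate (100 - nb - 1 - k) plainCell
    "<table><tr>" ++ String.join cells ++ "</tr></table>"

-- ===== PRECONDITION & SPEC =====
def Spec_barraHum (h_ : Int) (out : String) : Prop := out = barraHum_alt h_
instance (h_ : Int) (out : String) : Decidable (Spec_barraHum h_ out) := by unfold Spec_barraHum; infer_instance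

-- ===== CLAIM (what is proved, stated in full; the proofs are below) =====
def Claim_equal_barraHum : Prop := ∀ (h_ : Int), Dom_barraHum h_ → Spec_barraHum h_ (barraHum h_)

-- ===== LEMMAS AND PROOFS =====
theorem join_cons (a : String) (l : List String) : String.join (a :: l) = a ++ String.join l := by
  simp [String.join]
  induction l generalizing a with
  | nil => simp
  | cons b t ih => simp [List.foldl_cons]; rw [ih (a ++ b), ih b, String.append_assoc]

theorem join_nil : String.join ([] : List String) = "" := rfl

theorem join_append (l₁ l₂ : List String) :
    String.join (l₁ ++ l₂) = String.join l₁ ++ String.join l₂ := by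
  induction l₁ with
  | nil => simp [String.join]
  | cons a t ih => rw [List.cons_append, join_cons, join_cons, ih, String.append_assoc]

theorem join_rep_succ (n : Nat) (s : String) :
    String.join (List.replicate (n + 1) s) = s ++ String.join (List.replicate n s) := by
  rw [List.replicate_succ, join_cons]

theorem loopA_plain (h : Int) (hh : 90 < h) :
    ∀ (n : Nat) (count : Int) (s : String) (p : Bool) (ci : Int), h ≤ count →
      loopA h n count s p ci = s ++ String.join (List.replicate n plainCell) := by
  intro n
  induction n with
  | zero => intro count s p ci hc; simp [loopA, String.join]
  | succ n ih =>
    intro count s p ci hc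
    rw [loopA, if_neg (by omega), if_neg (by omega), ih (count + 1) _ p ci (by omega),
        join_rep_succ, ← String.append_assoc]

theorem loopA_nonblue (h : Int) (hle : h ≤ 90) :
    ∀ (n : Nat) (count : Int) (s : String) (ci : Int), h ≤ count →
      loopA h n count s false ci =
        s ++ String.join (List.replicate (n - ((if h ≥ 10 then (6:Int) else 5) - ci).toNat) plainCell) := by
  intro n
  induction n with
  | zero => intro count s ci hc; simp [loopA, String.join]
  | succ n ih =>
    intro count s ci hc
    rw [loopA, if_neg (by omega), if_pos hle]
    simp only [Bool.false_eq_true, if_false]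
    by_cases h10 : h ≥ 10
    · rw [if_pos h10]
      by_cases hci : ci > 5
      · rw [if_pos hci, ih (count + 1) _ ci (by omega)]
        have e1 : ((if h ≥ 10 then (6:Int) else 5) - ci).toNat = 0 := by
          simp only [if_pos h10]; omega
        rw [e1]
        have e2 : n + 1 - 0 = (n - 0) + 1 := by omega
        rw [e2, join_rep_succ, ← String.append_assoc]
      · rw [if_neg hci, ih (count + 1) s (ci + 1) (by omega)]
        have e1 : n + 1 - ((if h ≥ 10 then (6:Int) else 5) - ci).toNat
            = n - ((if h ≥ 10 then (6:Int) else 5) - (ci + 1)).toNat := by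
          simp only [if_pos h10]; omega
        rw [e1]
    · rw [if_neg h10]
      by_cases hci : ci > 4
      · rw [if_pos hci, ih (count + 1) _ ci (by omega)]
        have e1 : ((if h ≥ 10 then (6:Int) else 5) - ci).toNat = 0 := by
          simp only [if_neg h10]; omega
        rw [e1]
        have e2 : n + 1 - 0 = (n - 0) + 1 := by omega
        rw [e2, join_rep_succ, ← String.append_assoc]
      · rw [if_neg hci, ih (count + 1) s (ci + 1) (by omega)]
        have e1 : n + 1 - ((if h ≥ 10 then (6:Int) else 5) - ci).toNat
            = n - ((if h ≥ 10 then (6:Int) else 5) - (ci + 1)).toNat := by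
          simp only [if_neg h10]; omega
        rw [e1]

theorem loopA_blue (h : Int) :
    ∀ (m k : Nat) (count : Int) (s : String) (p : Bool) (ci : Int), count + m ≤ h →
      loopA h (m + k) count s p ci =
        loopA h k (count + m) (s ++ String.join (List.replicate m blueCell)) p ci := by
  intro m
  induction m with
  | zero => intro k count s p ci hc; simp [String.join]
  | succ m ih =>
    intro k count s p ci hc
    have e : m + 1 + k = (m + k) + 1 := by omega
    rw [e, loopA, if_pos (by omega), ih k (count + 1) _ p ci (by omega)]
    have e2 : count + 1 + (m : Int) = count + ((m : Int) + 1) := by ring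
    rw [join_rep_succ, ← String.append_assoc]
    push_cast
    rw [e2]

-- ===== VERDICT (by name: the statement is the Claim_ definition above) =====
theorem barraHum_spec : Claim_equal_barraHum := by
  intro h hd
  unfold Spec_barraHum
  simp only [barraHum, barraHum_alt]
  by_cases hb : h > 90
  · rw [if_pos hb, if_pos hb]
    by_cases h100 : h ≥ 100
    · have e100 : (100 : Nat) = 100 + 0 := rfl
      rw [e100, loopA_blue h 100 0 0 _ true 0 (by omega), loopA]
      have enb : (max 0 (min 100 h)).toNat = 100 := by omega
      rw [enb]
      simp [String.append_assoc]
      rw [← String.append_assoc]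
      congr 1
    · have hmh : ((h.toNat : Int)) = h := Int.toNat_of_nonneg (by omega)
      have e100 : (100 : Nat) = h.toNat + (100 - h.toNat) := by omega
      rw [e100, loopA_blue h h.toNat (100 - h.toNat) 0 _ true 0 (by omega),
          loopA_plain h hb (100 - h.toNat) _ _ true 0 (by omega)]
      have enb : (max 0 (min 100 h)).toNat = h.toNat := by omega
      rw [enb, join_append]
      simp [String.append_assoc]
      rw [← String.append_assoc]
      congr 1
  · rw [if_neg hb, if_neg hb]
    by_cases hpos : h ≤ 0
    · have e100 : (100 : Nat) = 99 + 1 := rfl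
      rw [e100, loopA, if_neg (by omega), if_pos (by omega), if_pos rfl,
          loopA_nonblue h (by omega) 99 _ _ 0 (by omega)]
      have ek : ((if h ≥ 10 then (6 : Int) else 5) - 0).toNat = 5 := by
        rw [if_neg (by omega)]; decide
      have enb : (max 0 (min 100 h)).toNat = 0 := by omega
      rw [ek, enb, if_neg (show ¬ h ≥ 10 by omega)]
      simp [join_cons, join_nil, String.append_assoc]
    · have hmh : ((h.toNat : Int)) = h := Int.toNat_of_nonneg (by omega)
      have hm90 : h.toNat ≤ 90 := by omega
      have e100 : (100 : Nat) = h.toNat + (100 - h.toNat) := by omega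
      rw [e100, loopA_blue h h.toNat (100 - h.toNat) 0 _ true 0 (by omega)]
      have e2 : 100 - h.toNat = (99 - h.toNat) + 1 := by omega
      rw [e2, loopA, if_neg (by omega), if_pos (by omega), if_pos rfl,
          loopA_nonblue h (by omega) (99 - h.toNat) _ _ 0 (by omega)]
      have enb : (max 0 (min 100 h)).toNat = h.toNat := by omega
      rw [enb]
      by_cases h10 : h ≥ 10
      · have ek : ((if h ≥ 10 then (6 : Int) else 5) - 0).toNat = 6 := by
          rw [if_pos h10]; decide
        have ec : 99 - h.toNat - 6 = 100 - h.toNat - 1 - 6 := by omega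
        rw [ek, if_pos h10, ec]
        simp [join_cons, join_append, String.append_assoc]
        rw [show 100 - h.toNat - 1 - 6 = 99 - h.toNat - 6 from by omega]
      · have ek : ((if h ≥ 10 then (6 : Int) else 5) - 0).toNat = 5 := by
          rw [if_neg h10]; decide
        have ec : 99 - h.toNat - 5 = 100 - h.toNat - 1 - 5 := by omega
        rw [ek, if_neg h10, ec]
        simp [join_cons, join_append, String.append_assoc]
        rw [show 100 - h.toNat - 1 - 5 = 99 - h.toNat - 5 from by omega]
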